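-- pv_equiv track=rewrite | github.com/hrssurt/lintcode | lintcode/897  Island City.py | numIslandCities
-- ===== SOURCE A (Python) =====
-- def numIslandCities(grid):
--     if not grid or not grid[0]:
--         return 0
--
--     DX, DY = [1,0,-1,0], [0,1,0,-1]
--
--     def is_valid(grid, x, y, visited):
--         return x >= 0 and y >= 0 and x < len(grid) and y < len(grid[0]) and (x, y) not in visited and grid[x][y] != 0
--
--     def bfs(grid, x, y, visited):
--         visited.add((x, y))
--         q = [(x,y)]
--         city_found = False if grid[x][y] == 1 else True
--         while q:
--             x, y = q.pop(0)
--             for dx, dy in zip(DX, DY):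
--                 nx, ny = x + dx, y + dy
--                 if is_valid(grid, nx, ny, visited):
--                     visited.add((nx, ny))
--                     q.append((nx, ny))
--                     if grid[nx][ny] == 2:
--                         city_found = True
--         return city_found
--
--     count = 0
--     q = []
--     visited = set()
--     for i in range(len(grid)):
--         for j in range(len(grid[0])):
--             if grid[i][j] == 1 or grid[i][j] == 2 and (i, j) not in visited:
--                 result = bfs(grid, i, j, visited)
--                 if result:
--                     count += 1
--
--     return count
-- ===== SOURCE B (Python) =====
-- def numIslandCities(grid):
--     if not grid or not grid[0]:
--         return 0
--     rows, cols = len(grid), len(grid[0])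
--     seen = set()
--     count = 0
--     for i in range(rows):
--         for j in range(cols):
--             if grid[i][j] == 2 and (i, j) not in seen:
--                 count += 1
--                 seen.add((i, j))
--                 stack = [(i, j)]
--                 while stack:
--                     x, y = stack.pop()
--                     for nx, ny in ((x + 1, y), (x - 1, y), (x, y + 1), (x, y - 1)):
--                         if 0 <= nx < rows and 0 <= ny < cols and (nx, ny) not in seen and grid[nx][ny] != 0:
--                             seen.add((nx, ny))
--                             stack.append((nx, ny))
--     return count
-- ===== Notes on version B (the rewrite author's own statement) =====
-- stated objective: alternative
-- what changed: B drops A's per-island city_found flag and its BFS queue: it seeds a stack-based flood fill only at not-yet-seen city cells (value 2) and counts the seeds, never traversing or re-scanning city-less islands, while A BFS-runs from every land cell (re-entering already-visited 1-cells) and tracks a flag.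
import Mathlib
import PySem

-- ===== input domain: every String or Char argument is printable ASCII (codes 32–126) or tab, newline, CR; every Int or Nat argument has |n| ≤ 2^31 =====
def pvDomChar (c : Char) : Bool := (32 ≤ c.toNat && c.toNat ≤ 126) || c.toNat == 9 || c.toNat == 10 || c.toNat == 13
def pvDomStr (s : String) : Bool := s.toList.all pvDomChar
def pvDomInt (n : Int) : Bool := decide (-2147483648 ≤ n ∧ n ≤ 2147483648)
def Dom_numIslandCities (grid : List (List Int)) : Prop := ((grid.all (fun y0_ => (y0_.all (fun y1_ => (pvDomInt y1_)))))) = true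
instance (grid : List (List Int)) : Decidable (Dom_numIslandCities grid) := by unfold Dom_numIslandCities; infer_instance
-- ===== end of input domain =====

-- B seeds a stack flood fill only at not-yet-seen city cells and counts the seeds (no BFS queue,
-- no city_found flag, city-less islands never traversed); same return value as A on Pre_.

-- ===== PORT A =====
-- grid[x][y]; every access A/B performs is in range under Pre_, so the getD defaults are never hit
def pvCell (grid : List (List Int)) (x y : Int) : Int :=
  (PySem.List.pyGet? ((PySem.List.pyGet? grid x).getD []) y).getD 0

-- grid[0] (only read when grid is nonempty, so the getD default is never hit)
def pvRow0 (grid : List (List Int)) : List Int := (PySem.List.pyGet? grid 0).getD []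

def pvIsValid (grid : List (List Int)) (x y : Int) (visited : PySem.Set (Int × Int)) : Bool :=
  decide (0 ≤ x) && decide (0 ≤ y) && decide (x < (grid.length : Int)) &&
    decide (y < ((pvRow0 grid).length : Int)) && !(PySem.Set.contains visited (x, y)) &&
    decide (pvCell grid x y ≠ 0)

-- body of bfs's `for dx, dy in zip(DX, DY):` loop
def pvStepA (grid : List (List Int)) (x y : Int)
    (s : PySem.Set (Int × Int) × List (Int × Int) × Bool) (d : Int × Int) :
    PySem.Set (Int × Int) × List (Int × Int) × Bool :=
  let nx := x + d.1
  let ny := y + d.2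
  if pvIsValid grid nx ny s.1 then
    (PySem.Set.add s.1 (nx, ny), s.2.1 ++ [(nx, ny)],
      if pvCell grid nx ny = 2 then true else s.2.2)
  else s

-- the `while q:` loop of bfs; fuel n*m+1 suffices on every input (proved below), so the
-- 0-fuel clause is unreachable
def pvBfsLoop (grid : List (List Int)) :
    Nat → PySem.Set (Int × Int) → List (Int × Int) → Bool → PySem.Set (Int × Int) × Bool
  | 0, visited, _, cityFound => (visited, cityFound)
  | fuel + 1, visited, q, cityFound =>
    match q with
    | [] => (visited, cityFound)
    | (x, y) :: rest =>
      let st := [((1 : Int), (0 : Int)), (0, 1), (-1, 0), (0, -1)].foldl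
        (pvStepA grid x y) (visited, rest, cityFound)
      pvBfsLoop grid fuel st.1 st.2.1 st.2.2

def pvBfs (grid : List (List Int)) (x y : Int) (visited : PySem.Set (Int × Int)) :
    PySem.Set (Int × Int) × Bool :=
  pvBfsLoop grid (grid.length * (pvRow0 grid).length + 1)
    (PySem.Set.add visited (x, y)) [(x, y)]
    (if pvCell grid x y = 1 then false else true)

def numIslandCities (grid : List (List Int)) : Int :=
  if grid = [] ∨ pvRow0 grid = [] then 0
  else
    (((PySem.List.pyRange 0 (grid.length : Int) 1).foldl
      (fun (s : Int × PySem.Set (Int × Int)) i =>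
        (PySem.List.pyRange 0 ((pvRow0 grid).length : Int) 1).foldl
          (fun (s : Int × PySem.Set (Int × Int)) j =>
            if pvCell grid i j = 1 ∨ (pvCell grid i j = 2 ∧ ¬ (i, j) ∈ s.2) then
              let r := pvBfs grid i j s.2
              (if r.2 then s.1 + 1 else s.1, r.1)
            else s) s)
      ((0 : Int), (PySem.Set.empty : PySem.Set (Int × Int))))).1

-- ===== PORT B =====
-- body of B's `for nx, ny in ...:` loop (B tests bounds and the cell inline, no helper)
def pvStepB (grid : List (List Int)) (rows cols : Int)
    (s : PySem.Set (Int × Int) × List (Int × Int)) (c : Int × Int) :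
    PySem.Set (Int × Int) × List (Int × Int) :=
  if 0 ≤ c.1 ∧ c.1 < rows ∧ 0 ≤ c.2 ∧ c.2 < cols ∧ ¬ c ∈ s.1 ∧ pvCell grid c.1 c.2 ≠ 0 then
    (PySem.Set.add s.1 c, c :: s.2)
  else s

-- the `while stack:` loop of B; stack top at the head (Python's list end); fuel n*m+1 suffices
def pvFloodLoop (grid : List (List Int)) (rows cols : Int) :
    Nat → PySem.Set (Int × Int) → List (Int × Int) → PySem.Set (Int × Int)
  | 0, seen, _ => seen
  | fuel + 1, seen, stack =>
    match stack with
    | [] => seen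
    | (x, y) :: rest =>
      let st := [(x + 1, y), (x - 1, y), (x, y + 1), (x, y - 1)].foldl
        (pvStepB grid rows cols) (seen, rest)
      pvFloodLoop grid rows cols fuel st.1 st.2

def numIslandCities_alt (grid : List (List Int)) : Int :=
  if grid = [] ∨ pvRow0 grid = [] then 0
  else
    let rows : Int := grid.length
    let cols : Int := (pvRow0 grid).length
    (((PySem.List.pyRange 0 rows 1).foldl
      (fun (s : Int × PySem.Set (Int × Int)) i =>
        (PySem.List.pyRange 0 cols 1).foldl
          (fun (s : Int × PySem.Set (Int × Int)) j =>
            if pvCell grid i j = 2 ∧ ¬ (i, j) ∈ s.2 then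
              (s.1 + 1,
                pvFloodLoop grid rows cols (rows.toNat * cols.toNat + 1)
                  (PySem.Set.add s.2 (i, j)) [(i, j)])
            else s) s)
      ((0 : Int), (PySem.Set.empty : PySem.Set (Int × Int))))).1

-- ===== PRECONDITION & SPEC =====
-- Pre_ excludes exactly the ragged grids on which A raises IndexError: the main loop of A
-- indexes every column j < len(grid[0]) of every row, so it raises iff a row is shorter than row 0.
def Pre_numIslandCities (grid : List (List Int)) : Prop :=
  ∀ r ∈ grid, (grid.headD []).length ≤ r.length
instance (grid : List (List Int)) : Decidable (Pre_numIslandCities grid) := by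
  unfold Pre_numIslandCities; infer_instance

def pvWitness_numIslandCities : List (List Int) := [[1, 2, 0], [0, 1, 0], [2, 0, 1]]

def Spec_numIslandCities (grid : List (List Int)) (out : Int) : Prop := out = numIslandCities_alt grid
instance (grid : List (List Int)) (out : Int) : Decidable (Spec_numIslandCities grid out) := by unfold Spec_numIslandCities; infer_instance

-- ===== CLAIM (what is proved, stated in full; the proofs are below) =====
def Claim_equal_numIslandCities : Prop := ∀ (grid : List (List Int)), Dom_numIslandCities grid → Pre_numIslandCities grid → Spec_numIslandCities grid (numIslandCities grid)

-- ===== LEMMAS AND PROOFS =====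

-- semantic layer: cells, adjacency, connectivity, scan order
def pvVal (g : List (List Int)) (c : Int × Int) : Int := pvCell g c.1 c.2

def pvGood (g : List (List Int)) (c : Int × Int) : Prop :=
  0 ≤ c.1 ∧ c.1 < (g.length : Int) ∧ 0 ≤ c.2 ∧ c.2 < ((pvRow0 g).length : Int) ∧ pvVal g c ≠ 0

def pvOffs : List (Int × Int) := [(1, 0), (0, 1), (-1, 0), (0, -1)]

def pvAdj (g : List (List Int)) (c d : Int × Int) : Prop :=
  pvGood g c ∧ pvGood g d ∧ (d.1 - c.1, d.2 - c.2) ∈ pvOffs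

def pvReach (g : List (List Int)) : (Int × Int) → (Int × Int) → Prop :=
  Relation.ReflTransGen (pvAdj g)

def pvL (g : List (List Int)) : List (Int × Int) :=
  (PySem.List.pyRange 0 (g.length : Int) 1).flatMap
    (fun i => (PySem.List.pyRange 0 ((pvRow0 g).length : Int) 1).map (fun j => (i, j)))

def pvUn (g : List (List Int)) (vis : List (Int × Int)) : Nat :=
  ((pvL g).toFinset \ vis.toFinset).card

def pvStart (g : List (List Int)) (c : Int × Int) : Prop :=
  pvGood g c ∧ (pvVal g c = 1 ∨ pvVal g c = 2)

def pvCity (g : List (List Int)) (c : Int × Int) : Prop := pvGood g c ∧ pvVal g c = 2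

def pvHasCity (g : List (List Int)) (c : Int × Int) : Prop :=
  ∃ d, pvReach g c d ∧ pvVal g d = 2

def pvBefore (g : List (List Int)) (q p : Int × Int) : Prop :=
  q ∈ pvL g ∧ p ∈ pvL g ∧ (pvL g).idxOf q < (pvL g).idxOf p

def pvIncA (g : List (List Int)) (P : List (Int × Int)) (p : Int × Int) : Prop :=
  pvStart g p ∧ pvHasCity g p ∧ ¬ ∃ q ∈ P, pvStart g q ∧ pvReach g q p

def pvIncB (g : List (List Int)) (P : List (Int × Int)) (p : Int × Int) : Prop :=
  pvCity g p ∧ ¬ ∃ q ∈ P, pvCity g q ∧ pvReach g q p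

noncomputable def pvSelA (g : List (List Int)) : List (Int × Int) → List (Int × Int) → List (Int × Int)
  | _, [] => []
  | P, p :: R =>
    @ite _ (pvIncA g P p) (Classical.propDecidable _)
      (p :: pvSelA g (P ++ [p]) R) (pvSelA g (P ++ [p]) R)

noncomputable def pvSelB (g : List (List Int)) : List (Int × Int) → List (Int × Int) → List (Int × Int)
  | _, [] => []
  | P, p :: R =>
    @ite _ (pvIncB g P p) (Classical.propDecidable _)
      (p :: pvSelB g (P ++ [p]) R) (pvSelB g (P ++ [p]) R)

def pvQA (g : List (List Int)) (p : Int × Int) : Prop :=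
  pvStart g p ∧ pvHasCity g p ∧ ∀ q, pvStart g q → pvReach g q p → ¬ pvBefore g q p

def pvQB (g : List (List Int)) (p : Int × Int) : Prop :=
  pvCity g p ∧ ∀ q, pvCity g q → pvReach g q p → ¬ pvBefore g q p

noncomputable def pvFirstCity (g : List (List Int)) (p : Int × Int) : Int × Int :=
  (((pvL g).find? (fun q => @decide (pvCity g q ∧ pvReach g q p) (Classical.propDecidable _))).getD p)

noncomputable def pvFirstStart (g : List (List Int)) (p : Int × Int) : Int × Int :=
  (((pvL g).find? (fun q => @decide (pvStart g q ∧ pvReach g q p) (Classical.propDecidable _))).getD p)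

-- basic facts
lemma pvMem_pvL (g : List (List Int)) (c : Int × Int) :
    c ∈ pvL g ↔ 0 ≤ c.1 ∧ c.1 < (g.length : Int) ∧ 0 ≤ c.2 ∧ c.2 < ((pvRow0 g).length : Int) := by
  obtain ⟨a, b⟩ := c
  simp only [pvL, List.mem_flatMap, List.mem_map, PySem.List.mem_pyRange_one, Prod.mk.injEq]
  constructor
  · rintro ⟨i, hi, j, hj, rfl, rfl⟩; exact ⟨hi.1, hi.2, hj.1, hj.2⟩
  · rintro ⟨h1, h2, h3, h4⟩; exact ⟨a, ⟨h1, h2⟩, b, ⟨h3, h4⟩, rfl, rfl⟩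

lemma pvNodup_pvL (g : List (List Int)) : (pvL g).Nodup := by
  apply List.nodup_flatMap.mpr
  constructor
  · intro i _
    exact (PySem.List.nodup_pyRange_one _ _).map (fun j j' h => by
      simpa using congrArg Prod.snd h)
  · apply List.Pairwise.imp ?_ (PySem.List.pairwise_lt_pyRange_one (a := 0) (b := (g.length : Int)))
    intro i i' hlt
    intro x hx hx'
    simp only [List.mem_map] at hx hx'
    obtain ⟨j, _, rfl⟩ := hx
    obtain ⟨j', _, h⟩ := hx'
    exact absurd (congrArg Prod.fst h) (by simp; omega)

lemma pvLen_pvL (g : List (List Int)) : (pvL g).length = g.length * (pvRow0 g).length := by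
  simp only [pvL, List.length_flatMap]
  rw [List.map_congr_left (g := fun _ => (pvRow0 g).length)
    (fun i _ => by simp [PySem.List.length_pyRange_one])]
  simp [List.map_const', List.sum_replicate, PySem.List.length_pyRange_one, Nat.mul_comm]

lemma pvGood_mem_pvL {g : List (List Int)} {c : Int × Int} (h : pvGood g c) : c ∈ pvL g := by
  exact (pvMem_pvL g c).mpr ⟨h.1, h.2.1, h.2.2.1, h.2.2.2.1⟩

lemma pvAdj_symm {g : List (List Int)} {c d : Int × Int} (h : pvAdj g c d) : pvAdj g d c := by
  obtain ⟨hc, hd, hm⟩ := h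
  refine ⟨hd, hc, ?_⟩
  simp only [pvOffs, List.mem_cons, Prod.mk.injEq,
    List.not_mem_nil, or_false] at hm ⊢
  omega

lemma pvReach_symm {g : List (List Int)} {c d : Int × Int} (h : pvReach g c d) : pvReach g d c :=
  Relation.ReflTransGen.symmetric (fun _ _ => pvAdj_symm) h

lemma pvReach_good {g : List (List Int)} {c d : Int × Int} (h : pvReach g c d)
    (hc : pvGood g c) : pvGood g d := by
  induction h with
  | refl => exact hc
  | tail _ hadj _ => exact hadj.2.1

lemma pvClosed_reach {g : List (List Int)} {V : List (Int × Int)} {c e : Int × Int}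
    (hcl : ∀ a ∈ V, ∀ d, pvAdj g a d → d ∈ V) (hc : c ∈ V) (h : pvReach g c e) : e ∈ V := by
  induction h with
  | refl => exact hc
  | tail hr hadj ih => exact hcl _ ih _ hadj

lemma pvIsValid_iff (g : List (List Int)) (x y : Int) (vis : PySem.Set (Int × Int)) :
    pvIsValid g x y vis = true ↔ pvGood g (x, y) ∧ (x, y) ∉ vis := by
  simp only [pvIsValid, pvGood, pvVal, Bool.and_eq_true, decide_eq_true_eq,
    Bool.not_eq_true', ← Bool.not_eq_true, PySem.Set.contains_iff]
  tauto

-- the 4-direction inner fold of A's bfs: appends the fresh valid neighbours to visited & queue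
lemma pvFoldA (g : List (List Int)) (x y : Int) :
    ∀ (dirs : List (Int × Int)) (vis : PySem.Set (Int × Int)) (q : List (Int × Int)) (cf : Bool),
    ∃ new : List (Int × Int),
      dirs.foldl (pvStepA g x y) (vis, q, cf)
          = (vis ++ new, q ++ new, cf || new.any (fun c => decide (pvVal g c = 2))) ∧
      new.Nodup ∧
      (∀ c ∈ new, c ∉ vis ∧ pvGood g c ∧ (c.1 - x, c.2 - y) ∈ dirs) ∧
      (∀ d ∈ dirs, pvGood g (x + d.1, y + d.2) → (x + d.1, y + d.2) ∈ vis ++ new) := by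
  intro dirs
  induction dirs with
  | nil =>
    intro vis q cf
    exact ⟨[], by simp, List.nodup_nil, by simp, by simp⟩
  | cons d rest ih =>
    intro vis q cf
    simp only [List.foldl_cons]
    by_cases hv : pvIsValid g (x + d.1) (y + d.2) vis = true
    · obtain ⟨hgood, hnot⟩ := (pvIsValid_iff g _ _ vis).mp hv
      have hstep : pvStepA g x y (vis, q, cf) d
          = (vis ++ [(x + d.1, y + d.2)], q ++ [(x + d.1, y + d.2)],
             cf || decide (pvVal g (x + d.1, y + d.2) = 2)) := by
        simp only [pvStepA, hv, if_pos]
        rw [PySem.Set.add_of_not_mem hnot]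
        have hcf : (if pvCell g (x + d.1) (y + d.2) = 2 then true else cf)
            = (cf || decide (pvVal g (x + d.1, y + d.2) = 2)) := by
          by_cases h2 : pvCell g (x + d.1) (y + d.2) = 2 <;> simp [h2, pvVal]
        rw [hcf]
      rw [hstep]
      obtain ⟨new2, heq, hnd2, hprop2, hcov2⟩ :=
        ih (vis ++ [(x + d.1, y + d.2)]) (q ++ [(x + d.1, y + d.2)])
          (cf || decide (pvVal g (x + d.1, y + d.2) = 2))
      refine ⟨(x + d.1, y + d.2) :: new2, ?_, ?_, ?_, ?_⟩
      · rw [heq]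
        simp [List.append_assoc, Bool.or_assoc]
      · exact List.nodup_cons.mpr ⟨fun hmem => (hprop2 _ hmem).1 (by simp), hnd2⟩
      · intro c hc
        rcases List.mem_cons.mp hc with rfl | hc2
        · refine ⟨hnot, hgood, ?_⟩
          simp
        · obtain ⟨h1, h2, h3⟩ := hprop2 c hc2
          exact ⟨fun hm => h1 (List.mem_append_left _ hm), h2, List.mem_cons_of_mem _ h3⟩
      · intro e he hge
        rcases List.mem_cons.mp he with rfl | he2
        · simp
        · have := hcov2 e he2 hge
          simpa [List.append_assoc] using this
    · have hstep : pvStepA g x y (vis, q, cf) d = (vis, q, cf) := by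
        simp [pvStepA, hv]
      rw [hstep]
      obtain ⟨new2, heq, hnd2, hprop2, hcov2⟩ := ih vis q cf
      refine ⟨new2, heq, hnd2, ?_, ?_⟩
      · intro c hc
        obtain ⟨h1, h2, h3⟩ := hprop2 c hc
        exact ⟨h1, h2, List.mem_cons_of_mem _ h3⟩
      · intro e he hge
        rcases List.mem_cons.mp he with rfl | he2
        · have : (x + e.1, y + e.2) ∈ vis := by
            by_contra hn
            exact hv ((pvIsValid_iff g _ _ vis).mpr ⟨hge, hn⟩)
          exact List.mem_append_left _ this
        · exact hcov2 e he2 hge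

-- the 4-neighbour inner fold of B's flood fill
lemma pvFoldB (g : List (List Int)) :
    ∀ (cands : List (Int × Int)) (vis : PySem.Set (Int × Int)) (q : List (Int × Int)),
    ∃ new : List (Int × Int),
      cands.foldl (pvStepB g (g.length : Int) ((pvRow0 g).length : Int)) (vis, q)
          = (vis ++ new, new.reverse ++ q) ∧
      new.Nodup ∧
      (∀ c ∈ new, c ∉ vis ∧ pvGood g c ∧ c ∈ cands) ∧
      (∀ e ∈ cands, pvGood g e → e ∈ vis ++ new) := by
  intro cands
  induction cands with
  | nil =>
    intro vis q
    exact ⟨[], by simp, List.nodup_nil, by simp, by simp⟩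
  | cons d rest ih =>
    intro vis q
    simp only [List.foldl_cons]
    by_cases hv : pvGood g d ∧ d ∉ vis
    · have hstep : pvStepB g (g.length : Int) ((pvRow0 g).length : Int) (vis, q) d
          = (vis ++ [d], d :: q) := by
        have hcond : 0 ≤ d.1 ∧ d.1 < (g.length : Int) ∧ 0 ≤ d.2 ∧ d.2 < ((pvRow0 g).length : Int) ∧
            ¬ d ∈ vis ∧ pvCell g d.1 d.2 ≠ 0 :=
          ⟨hv.1.1, hv.1.2.1, hv.1.2.2.1, hv.1.2.2.2.1, hv.2, hv.1.2.2.2.2⟩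
        simp only [pvStepB, if_pos hcond]
        rw [PySem.Set.add_of_not_mem hv.2]
      rw [hstep]
      obtain ⟨new2, heq, hnd2, hprop2, hcov2⟩ := ih (vis ++ [d]) (d :: q)
      refine ⟨d :: new2, ?_, ?_, ?_, ?_⟩
      · rw [heq]
        simp [List.append_assoc]
      · exact List.nodup_cons.mpr ⟨fun hmem => (hprop2 _ hmem).1 (by simp), hnd2⟩
      · intro c hc
        rcases List.mem_cons.mp hc with rfl | hc2
        · exact ⟨hv.2, hv.1, List.mem_cons_self ..⟩
        · obtain ⟨h1, h2, h3⟩ := hprop2 c hc2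
          exact ⟨fun hm => h1 (List.mem_append_left _ hm), h2, List.mem_cons_of_mem _ h3⟩
      · intro e he hge
        rcases List.mem_cons.mp he with rfl | he2
        · simp
        · have := hcov2 e he2 hge
          simpa [List.append_assoc] using this
    · have hmem : pvGood g d → d ∈ vis := by tauto
      have hstep : pvStepB g (g.length : Int) ((pvRow0 g).length : Int) (vis, q) d = (vis, q) := by
        simp only [pvStepB, ite_eq_right_iff]
        rintro ⟨h1, h2, h3, h4, h5, h6⟩
        exact absurd (hmem ⟨h1, h2, h3, h4, by simpa [pvVal] using h6⟩) h5
      rw [hstep]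
      obtain ⟨new2, heq, hnd2, hprop2, hcov2⟩ := ih vis q
      refine ⟨new2, heq, hnd2, ?_, ?_⟩
      · intro c hc
        obtain ⟨h1, h2, h3⟩ := hprop2 c hc
        exact ⟨h1, h2, List.mem_cons_of_mem _ h3⟩
      · intro e he hge
        rcases List.mem_cons.mp he with rfl | he2
        · exact List.mem_append_left _ (hmem hge)
        · exact hcov2 e he2 hge

lemma pvUn_append (g : List (List Int)) (vis new : List (Int × Int)) (hnd : new.Nodup)
    (h : ∀ c ∈ new, c ∈ pvL g ∧ c ∉ vis) :
    pvUn g (vis ++ new) + new.length = pvUn g vis := by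
  have hsub : new.toFinset ⊆ (pvL g).toFinset \ vis.toFinset := by
    intro c hc
    rw [List.mem_toFinset] at hc
    obtain ⟨h1, h2⟩ := h c hc
    simp [Finset.mem_sdiff, List.mem_toFinset, h1, h2]
  have hset : (pvL g).toFinset \ (vis ++ new).toFinset
      = ((pvL g).toFinset \ vis.toFinset) \ new.toFinset := by
    ext c; simp [Finset.mem_sdiff, List.mem_toFinset]; tauto
  have hcard : new.toFinset.card = new.length := List.toFinset_card_of_nodup hnd
  unfold pvUn
  rw [hset, Finset.card_sdiff_of_subset hsub, hcard,
    Nat.sub_add_cancel (by rw [← hcard]; exact Finset.card_le_card hsub)]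

lemma pvUn_le (g : List (List Int)) (vis : List (Int × Int)) :
    pvUn g vis ≤ g.length * (pvRow0 g).length := by
  calc pvUn g vis ≤ (pvL g).toFinset.card := Finset.card_le_card (Finset.sdiff_subset)
    _ ≤ (pvL g).length := List.toFinset_card_le _
    _ = _ := pvLen_pvL g

-- A's bfs while-loop: computes the closure of the queue, records whether a city was added
lemma pvBfsLoop_spec (g : List (List Int)) :
    ∀ (fuel : Nat) (vis : PySem.Set (Int × Int)) (q : List (Int × Int)) (cf : Bool),
    vis.Nodup →
    (∀ b ∈ q, b ∈ vis ∧ pvGood g b) →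
    (∀ c ∈ vis, (∀ d, pvAdj g c d → d ∈ vis) ∨ c ∈ q) →
    q.length + pvUn g vis ≤ fuel →
    (pvBfsLoop g fuel vis q cf).1.Nodup ∧
    (∀ c ∈ vis, c ∈ (pvBfsLoop g fuel vis q cf).1) ∧
    (∀ c ∈ (pvBfsLoop g fuel vis q cf).1, c ∈ vis ∨ (pvGood g c ∧ ∃ b ∈ q, pvReach g b c)) ∧
    (∀ c ∈ (pvBfsLoop g fuel vis q cf).1, ∀ d, pvAdj g c d → d ∈ (pvBfsLoop g fuel vis q cf).1) ∧
    ((pvBfsLoop g fuel vis q cf).2 = true ↔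
      cf = true ∨ ∃ c ∈ (pvBfsLoop g fuel vis q cf).1, c ∉ vis ∧ pvVal g c = 2) := by
  intro fuel
  induction fuel with
  | zero =>
    intro vis q cf hnd hq hcl hb
    have hqe : q = [] := List.eq_nil_of_length_eq_zero (by omega)
    subst hqe
    have hred : pvBfsLoop g 0 vis [] cf = (vis, cf) := rfl
    rw [hred]
    refine ⟨hnd, fun c hc => hc, fun c hc => Or.inl hc, ?_, ?_⟩
    · intro c hc d hadj
      rcases hcl c hc with h | h
      · exact h d hadj
      · cases h
    · exact ⟨Or.inl, fun h => by
        rcases h with h | ⟨c, hc, hn, _⟩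
        · exact h
        · exact absurd hc hn⟩
  | succ fuel ih =>
    intro vis q cf hnd hq hcl hb
    rcases q with _ | ⟨⟨x, y⟩, rest⟩
    · have hred : pvBfsLoop g (fuel + 1) vis [] cf = (vis, cf) := rfl
      rw [hred]
      refine ⟨hnd, fun c hc => hc, fun c hc => Or.inl hc, ?_, ?_⟩
      · intro c hc d hadj
        rcases hcl c hc with h | h
        · exact h d hadj
        · cases h
      · exact ⟨Or.inl, fun h => by
          rcases h with h | ⟨c, hc, hn, _⟩
          · exact h
          · exact absurd hc hn⟩
    · obtain ⟨hxyv, hxyg⟩ := hq (x, y) (List.mem_cons_self ..)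
      obtain ⟨new, heq, hndn, hprop, hcov⟩ := pvFoldA g x y pvOffs vis rest cf
      have hloop : pvBfsLoop g (fuel + 1) vis ((x, y) :: rest) cf
          = pvBfsLoop g fuel (vis ++ new) (rest ++ new)
              (cf || new.any (fun c => decide (pvVal g c = 2))) := by
        show pvBfsLoop g fuel
          ([((1 : Int), (0 : Int)), (0, 1), (-1, 0), (0, -1)].foldl (pvStepA g x y) (vis, rest, cf)).1
          ([((1 : Int), (0 : Int)), (0, 1), (-1, 0), (0, -1)].foldl (pvStepA g x y) (vis, rest, cf)).2.1
          ([((1 : Int), (0 : Int)), (0, 1), (-1, 0), (0, -1)].foldl (pvStepA g x y) (vis, rest, cf)).2.2 = _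
        rw [show ([((1 : Int), (0 : Int)), (0, 1), (-1, 0), (0, -1)] : List (Int × Int)) = pvOffs from rfl,
          heq]
      have hdisj : ∀ a ∈ vis, a ∉ new := fun a ha hb' => (hprop a hb').1 ha
      have hnd1 : (vis ++ new).Nodup :=
        List.nodup_append.mpr ⟨hnd, hndn, fun a ha b hbm hab => hdisj a ha (hab ▸ hbm)⟩
      have hq1 : ∀ b ∈ rest ++ new, b ∈ vis ++ new ∧ pvGood g b := by
        intro b hbm
        rcases List.mem_append.mp hbm with h | h
        · obtain ⟨h1, h2⟩ := hq b (List.mem_cons_of_mem _ h)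
          exact ⟨List.mem_append_left _ h1, h2⟩
        · exact ⟨List.mem_append_right _ h, (hprop b h).2.1⟩
      have hcl1 : ∀ c ∈ vis ++ new, (∀ d, pvAdj g c d → d ∈ vis ++ new) ∨ c ∈ rest ++ new := by
        intro c hcm
        rcases List.mem_append.mp hcm with h | h
        · rcases hcl c h with h2 | h2
          · exact Or.inl (fun d hadj => List.mem_append_left _ (h2 d hadj))
          · rcases List.mem_cons.mp h2 with rfl | h3
            · left
              intro d hadj
              have hoff : (d.1 - x, d.2 - y) ∈ pvOffs := hadj.2.2
              have := hcov (d.1 - x, d.2 - y) hoff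
              have hde : (x + (d.1 - x), y + (d.2 - y)) = d := by
                obtain ⟨d1, d2⟩ := d
                simp only [Prod.mk.injEq]
                omega
              rw [hde] at this
              exact this hadj.2.1
            · exact Or.inr (List.mem_append_left _ h3)
        · exact Or.inr (List.mem_append_right _ h)
      have hun := pvUn_append g vis new hndn
        (fun c hc => ⟨pvGood_mem_pvL (hprop c hc).2.1, (hprop c hc).1⟩)
      have hb1 : (rest ++ new).length + pvUn g (vis ++ new) ≤ fuel := by
        simp only [List.length_append, List.length_cons] at hb ⊢
        omega
      obtain ⟨C1, C2, C3, C4, C5⟩ := ih (vis ++ new) (rest ++ new)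
        (cf || new.any (fun c => decide (pvVal g c = 2))) hnd1 hq1 hcl1 hb1
      rw [hloop]
      refine ⟨C1, ?_, ?_, C4, ?_⟩
      · exact fun c hc => C2 c (List.mem_append_left _ hc)
      · intro c hc
        rcases C3 c hc with h | ⟨hg, b, hbm, hr⟩
        · rcases List.mem_append.mp h with h2 | h2
          · exact Or.inl h2
          · exact Or.inr ⟨(hprop c h2).2.1, (x, y), List.mem_cons_self ..,
              Relation.ReflTransGen.single ⟨hxyg, (hprop c h2).2.1, (hprop c h2).2.2⟩⟩
        · rcases List.mem_append.mp hbm with h2 | h2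
          · exact Or.inr ⟨hg, b, List.mem_cons_of_mem _ h2, hr⟩
          · exact Or.inr ⟨hg, (x, y), List.mem_cons_self ..,
              Relation.ReflTransGen.trans
                (Relation.ReflTransGen.single ⟨hxyg, (hprop b h2).2.1, (hprop b h2).2.2⟩) hr⟩
      · rw [C5]
        constructor
        · rintro (hor | ⟨c, hc, hn, h2⟩)
          · rcases Bool.or_eq_true_iff.mp hor with h | h
            · exact Or.inl h
            · obtain ⟨c, hcn, hdec⟩ := List.any_eq_true.mp h
              exact Or.inr ⟨c, C2 c (List.mem_append_right _ hcn),
                fun hv => (hprop c hcn).1 hv, of_decide_eq_true hdec⟩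
          · exact Or.inr ⟨c, hc, fun hv => hn (List.mem_append_left _ hv), h2⟩
        · rintro (hcf | ⟨c, hc, hn, h2⟩)
          · exact Or.inl (Bool.or_eq_true_iff.mpr (Or.inl hcf))
          · by_cases hcn : c ∈ vis ++ new
            · rcases List.mem_append.mp hcn with h3 | h3
              · exact absurd h3 hn
              · exact Or.inl (Bool.or_eq_true_iff.mpr (Or.inr
                  (List.any_eq_true.mpr ⟨c, h3, decide_eq_true h2⟩)))
            · exact Or.inr ⟨c, hc, hcn, h2⟩

lemma pvCand_adj {g : List (List Int)} {x y : Int} {c : Int × Int}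
    (hg : pvGood g (x, y)) (hc : pvGood g c)
    (hm : c ∈ [(x + 1, y), (x - 1, y), (x, y + 1), (x, y - 1)]) : pvAdj g (x, y) c := by
  refine ⟨hg, hc, ?_⟩
  obtain ⟨c1, c2⟩ := c
  simp only [pvOffs, List.mem_cons, List.not_mem_nil, or_false, Prod.mk.injEq] at hm ⊢
  omega

-- B's flood while-loop: same closure, no flag
lemma pvFloodLoop_spec (g : List (List Int)) :
    ∀ (fuel : Nat) (vis : PySem.Set (Int × Int)) (q : List (Int × Int)),
    vis.Nodup →
    (∀ b ∈ q, b ∈ vis ∧ pvGood g b) →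
    (∀ c ∈ vis, (∀ d, pvAdj g c d → d ∈ vis) ∨ c ∈ q) →
    q.length + pvUn g vis ≤ fuel →
    (pvFloodLoop g (g.length : Int) ((pvRow0 g).length : Int) fuel vis q).Nodup ∧
    (∀ c ∈ vis, c ∈ pvFloodLoop g (g.length : Int) ((pvRow0 g).length : Int) fuel vis q) ∧
    (∀ c ∈ pvFloodLoop g (g.length : Int) ((pvRow0 g).length : Int) fuel vis q,
      c ∈ vis ∨ (pvGood g c ∧ ∃ b ∈ q, pvReach g b c)) ∧
    (∀ c ∈ pvFloodLoop g (g.length : Int) ((pvRow0 g).length : Int) fuel vis q,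
      ∀ d, pvAdj g c d → d ∈ pvFloodLoop g (g.length : Int) ((pvRow0 g).length : Int) fuel vis q) := by
  intro fuel
  induction fuel with
  | zero =>
    intro vis q hnd hq hcl hb
    have hqe : q = [] := List.eq_nil_of_length_eq_zero (by omega)
    subst hqe
    have hred : pvFloodLoop g (g.length : Int) ((pvRow0 g).length : Int) 0 vis [] = vis := rfl
    rw [hred]
    refine ⟨hnd, fun c hc => hc, fun c hc => Or.inl hc, ?_⟩
    intro c hc d hadj
    rcases hcl c hc with h | h
    · exact h d hadj
    · cases h
  | succ fuel ih =>
    intro vis q hnd hq hcl hb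
    rcases q with _ | ⟨⟨x, y⟩, rest⟩
    · have hred : pvFloodLoop g (g.length : Int) ((pvRow0 g).length : Int) (fuel + 1) vis [] = vis := rfl
      rw [hred]
      refine ⟨hnd, fun c hc => hc, fun c hc => Or.inl hc, ?_⟩
      intro c hc d hadj
      rcases hcl c hc with h | h
      · exact h d hadj
      · cases h
    · obtain ⟨hxyv, hxyg⟩ := hq (x, y) (List.mem_cons_self ..)
      obtain ⟨new, heq, hndn, hprop, hcov⟩ :=
        pvFoldB g [(x + 1, y), (x - 1, y), (x, y + 1), (x, y - 1)] vis rest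
      have hloop : pvFloodLoop g (g.length : Int) ((pvRow0 g).length : Int) (fuel + 1) vis ((x, y) :: rest)
          = pvFloodLoop g (g.length : Int) ((pvRow0 g).length : Int) fuel (vis ++ new) (new.reverse ++ rest) := by
        show pvFloodLoop g (g.length : Int) ((pvRow0 g).length : Int) fuel
          ([(x + 1, y), (x - 1, y), (x, y + 1), (x, y - 1)].foldl
            (pvStepB g (g.length : Int) ((pvRow0 g).length : Int)) (vis, rest)).1
          ([(x + 1, y), (x - 1, y), (x, y + 1), (x, y - 1)].foldl
            (pvStepB g (g.length : Int) ((pvRow0 g).length : Int)) (vis, rest)).2 = _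
        rw [heq]
      have hdisj : ∀ a ∈ vis, a ∉ new := fun a ha hb' => (hprop a hb').1 ha
      have hnd1 : (vis ++ new).Nodup :=
        List.nodup_append.mpr ⟨hnd, hndn, fun a ha b hbm hab => hdisj a ha (hab ▸ hbm)⟩
      have hq1 : ∀ b ∈ new.reverse ++ rest, b ∈ vis ++ new ∧ pvGood g b := by
        intro b hbm
        rcases List.mem_append.mp hbm with h | h
        · have h' := List.mem_reverse.mp h
          exact ⟨List.mem_append_right _ h', (hprop b h').2.1⟩
        · obtain ⟨h1, h2⟩ := hq b (List.mem_cons_of_mem _ h)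
          exact ⟨List.mem_append_left _ h1, h2⟩
      have hcl1 : ∀ c ∈ vis ++ new, (∀ d, pvAdj g c d → d ∈ vis ++ new) ∨ c ∈ new.reverse ++ rest := by
        intro c hcm
        rcases List.mem_append.mp hcm with h | h
        · rcases hcl c h with h2 | h2
          · exact Or.inl (fun d hadj => List.mem_append_left _ (h2 d hadj))
          · rcases List.mem_cons.mp h2 with rfl | h3
            · left
              intro d hadj
              have hoff : (d.1 - x, d.2 - y) ∈ pvOffs := hadj.2.2
              have hdm : d ∈ [(x + 1, y), (x - 1, y), (x, y + 1), (x, y - 1)] := by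
                obtain ⟨d1, d2⟩ := d
                simp only [pvOffs, List.mem_cons, List.not_mem_nil, or_false,
                  Prod.mk.injEq] at hoff ⊢
                omega
              exact hcov d hdm hadj.2.1
            · exact Or.inr (List.mem_append_right _ h3)
        · exact Or.inr (List.mem_append_left _ (List.mem_reverse.mpr h))
      have hun := pvUn_append g vis new hndn
        (fun c hc => ⟨pvGood_mem_pvL (hprop c hc).2.1, (hprop c hc).1⟩)
      have hb1 : (new.reverse ++ rest).length + pvUn g (vis ++ new) ≤ fuel := by
        simp only [List.length_append, List.length_cons, List.length_reverse] at hb ⊢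
        omega
      obtain ⟨C1, C2, C3, C4⟩ := ih (vis ++ new) (new.reverse ++ rest) hnd1 hq1 hcl1 hb1
      rw [hloop]
      refine ⟨C1, ?_, ?_, C4⟩
      · exact fun c hc => C2 c (List.mem_append_left _ hc)
      · intro c hc
        rcases C3 c hc with h | ⟨hg, b, hbm, hr⟩
        · rcases List.mem_append.mp h with h2 | h2
          · exact Or.inl h2
          · exact Or.inr ⟨(hprop c h2).2.1, (x, y), List.mem_cons_self ..,
              Relation.ReflTransGen.single
                (pvCand_adj hxyg (hprop c h2).2.1 (hprop c h2).2.2)⟩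
        · rcases List.mem_append.mp hbm with h2 | h2
          · have h2' := List.mem_reverse.mp h2
            exact Or.inr ⟨hg, (x, y), List.mem_cons_self ..,
              Relation.ReflTransGen.trans
                (Relation.ReflTransGen.single
                  (pvCand_adj hxyg (hprop b h2').2.1 (hprop b h2').2.2)) hr⟩
          · exact Or.inr ⟨hg, b, List.mem_cons_of_mem _ h2, hr⟩

-- A's bfs called on a fresh start cell
lemma pvBfs_spec (g : List (List Int)) (s : Int × Int) (vis₀ : PySem.Set (Int × Int))
    (hnd : vis₀.Nodup) (hcl : ∀ a ∈ vis₀, ∀ d, pvAdj g a d → d ∈ vis₀)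
    (hs : pvGood g s) (hns : s ∉ vis₀) (hv : pvVal g s = 1 ∨ pvVal g s = 2) :
    (pvBfs g s.1 s.2 vis₀).1.Nodup ∧
    (∀ c, c ∈ (pvBfs g s.1 s.2 vis₀).1 ↔ c ∈ vis₀ ∨ pvReach g s c) ∧
    ((pvBfs g s.1 s.2 vis₀).2 = true ↔ pvHasCity g s) := by
  obtain ⟨s1, s2⟩ := s
  have hadd : PySem.Set.add vis₀ (s1, s2) = vis₀ ++ [(s1, s2)] := PySem.Set.add_of_not_mem hns
  have hbfs : pvBfs g s1 s2 vis₀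
      = pvBfsLoop g (g.length * (pvRow0 g).length + 1) (vis₀ ++ [(s1, s2)]) [(s1, s2)]
          (if pvCell g s1 s2 = 1 then false else true) := by
    unfold pvBfs
    rw [hadd]
  have hnd1 : (vis₀ ++ [(s1, s2)]).Nodup :=
    List.nodup_append.mpr ⟨hnd, List.nodup_singleton _,
      by intro a ha b hbm hab; rw [List.mem_singleton.mp hbm] at hab; exact hns (hab ▸ ha)⟩
  have hq1 : ∀ b ∈ [(s1, s2)], b ∈ vis₀ ++ [(s1, s2)] ∧ pvGood g b := by
    intro b hbm
    rw [List.mem_singleton.mp hbm]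
    exact ⟨List.mem_append_right _ (by simp), hs⟩
  have hcl1 : ∀ c ∈ vis₀ ++ [(s1, s2)],
      (∀ d, pvAdj g c d → d ∈ vis₀ ++ [(s1, s2)]) ∨ c ∈ [(s1, s2)] := by
    intro c hc
    rcases List.mem_append.mp hc with h | h
    · exact Or.inl (fun d hadj => List.mem_append_left _ (hcl c h d hadj))
    · exact Or.inr h
  have hb1 : 1 + pvUn g (vis₀ ++ [(s1, s2)]) ≤ g.length * (pvRow0 g).length + 1 := by
    have := pvUn_le g (vis₀ ++ [(s1, s2)])
    omega
  obtain ⟨C1, C2, C3, C4, C5⟩ := pvBfsLoop_spec g (g.length * (pvRow0 g).length + 1)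
    (vis₀ ++ [(s1, s2)]) [(s1, s2)] (if pvCell g s1 s2 = 1 then false else true)
    hnd1 hq1 hcl1 hb1
  rw [hbfs]
  have hmemiff : ∀ c, c ∈ (pvBfsLoop g (g.length * (pvRow0 g).length + 1)
      (vis₀ ++ [(s1, s2)]) [(s1, s2)] (if pvCell g s1 s2 = 1 then false else true)).1
      ↔ c ∈ vis₀ ∨ pvReach g (s1, s2) c := by
    intro c
    constructor
    · intro hc
      rcases C3 c hc with h | ⟨_, b, hbm, hr⟩
      · rcases List.mem_append.mp h with h2 | h2
        · exact Or.inl h2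
        · exact Or.inr (List.mem_singleton.mp h2 ▸ Relation.ReflTransGen.refl)
      · exact Or.inr (List.mem_singleton.mp hbm ▸ hr)
    · intro h
      rcases h with h | hr
      · exact C2 c (List.mem_append_left _ h)
      · exact pvClosed_reach C4 (C2 _ (List.mem_append_right _ (by simp))) hr
  refine ⟨C1, hmemiff, ?_⟩
  rcases hv with h1 | h2
  · have hc1 : pvCell g s1 s2 = 1 := h1
    rw [if_pos hc1] at C5 hmemiff ⊢
    rw [C5]
    constructor
    · rintro (h | ⟨c, hc, hn, h2c⟩)
      · cases h
      · have := (hmemiff c).mp hc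
        rcases this with hcv | hr
        · exact absurd (List.mem_append_left _ hcv) hn
        · exact ⟨c, hr, h2c⟩
    · rintro ⟨d, hr, h2d⟩
      have hne : d ≠ (s1, s2) := by
        intro he
        rw [he] at h2d
        rw [pvVal] at h1 h2d
        omega
      refine Or.inr ⟨d, (hmemiff d).mpr (Or.inr hr), ?_, h2d⟩
      intro hdm
      rcases List.mem_append.mp hdm with h3 | h3
      · exact hns (pvClosed_reach hcl h3 (pvReach_symm hr))
      · exact hne (List.mem_singleton.mp h3)
  · have hc1 : pvCell g s1 s2 ≠ 1 := by
      have h2' : pvCell g s1 s2 = 2 := h2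
      omega
    rw [if_neg hc1] at C5 ⊢
    rw [C5]
    exact ⟨fun _ => ⟨(s1, s2), Relation.ReflTransGen.refl, h2⟩, fun _ => Or.inl rfl⟩

-- A's bfs re-called on an already visited 1-cell (the `or`-precedence quirk): a no-op
lemma pvBfs_visited (g : List (List Int)) (s : Int × Int) (vis₀ : PySem.Set (Int × Int))
    (hcl : ∀ a ∈ vis₀, ∀ d, pvAdj g a d → d ∈ vis₀)
    (hs : pvGood g s) (hmem : s ∈ vis₀) (h1 : pvVal g s = 1) :
    pvBfs g s.1 s.2 vis₀ = (vis₀, false) := by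
  obtain ⟨s1, s2⟩ := s
  have hadd : PySem.Set.add vis₀ (s1, s2) = vis₀ := PySem.Set.add_of_mem hmem
  have hc1 : pvCell g s1 s2 = 1 := h1
  obtain ⟨new, heq, _, hprop, _⟩ := pvFoldA g s1 s2 pvOffs vis₀ [] false
  have hnew : new = [] := by
    cases new with
    | nil => rfl
    | cons a t =>
      obtain ⟨hn, hg, hoff⟩ := hprop a (List.mem_cons_self ..)
      exact absurd (hcl _ hmem a ⟨hs, hg, hoff⟩) hn
  have hnil : ∀ (f : Nat) (vis : PySem.Set (Int × Int)) (cf : Bool),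
      pvBfsLoop g f vis [] cf = (vis, cf) := by
    intro f vis cf
    cases f <;> rfl
  show pvBfs g s1 s2 vis₀ = (vis₀, false)
  unfold pvBfs
  rw [hadd, if_pos hc1]
  have hloop : pvBfsLoop g (g.length * (pvRow0 g).length + 1) vis₀ [(s1, s2)] false
      = pvBfsLoop g (g.length * (pvRow0 g).length) (vis₀ ++ new) ([] ++ new)
          (false || new.any (fun c => decide (pvVal g c = 2))) := by
    show pvBfsLoop g (g.length * (pvRow0 g).length)
      ([((1 : Int), (0 : Int)), (0, 1), (-1, 0), (0, -1)].foldl (pvStepA g s1 s2) (vis₀, [], false)).1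
      ([((1 : Int), (0 : Int)), (0, 1), (-1, 0), (0, -1)].foldl (pvStepA g s1 s2) (vis₀, [], false)).2.1
      ([((1 : Int), (0 : Int)), (0, 1), (-1, 0), (0, -1)].foldl (pvStepA g s1 s2) (vis₀, [], false)).2.2 = _
    rw [show ([((1 : Int), (0 : Int)), (0, 1), (-1, 0), (0, -1)] : List (Int × Int)) = pvOffs from rfl,
      heq]
  rw [hloop, hnew]
  simp only [List.append_nil, List.any_nil, Bool.or_false]
  exact hnil _ _ _

-- B's flood fill called on a fresh city cell
lemma pvFlood_spec (g : List (List Int)) (s : Int × Int) (vis₀ : PySem.Set (Int × Int))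
    (hnd : vis₀.Nodup) (hcl : ∀ a ∈ vis₀, ∀ d, pvAdj g a d → d ∈ vis₀)
    (hs : pvGood g s) (hns : s ∉ vis₀) :
    (pvFloodLoop g (g.length : Int) ((pvRow0 g).length : Int)
        ((g.length : Int).toNat * (((pvRow0 g).length : Int)).toNat + 1)
        (PySem.Set.add vis₀ s) [s]).Nodup ∧
    (∀ c, c ∈ pvFloodLoop g (g.length : Int) ((pvRow0 g).length : Int)
        ((g.length : Int).toNat * (((pvRow0 g).length : Int)).toNat + 1)
        (PySem.Set.add vis₀ s) [s] ↔ c ∈ vis₀ ∨ pvReach g s c) := by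
  have hadd : PySem.Set.add vis₀ s = vis₀ ++ [s] := PySem.Set.add_of_not_mem hns
  have hfuel : (g.length : Int).toNat * (((pvRow0 g).length : Int)).toNat + 1
      = g.length * (pvRow0 g).length + 1 := by
    simp
  have hnd1 : (vis₀ ++ [s]).Nodup :=
    List.nodup_append.mpr ⟨hnd, List.nodup_singleton _,
      by intro a ha b hbm hab; rw [List.mem_singleton.mp hbm] at hab; exact hns (hab ▸ ha)⟩
  have hq1 : ∀ b ∈ [s], b ∈ vis₀ ++ [s] ∧ pvGood g b := by
    intro b hbm
    rw [List.mem_singleton.mp hbm]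
    exact ⟨List.mem_append_right _ (by simp), hs⟩
  have hcl1 : ∀ c ∈ vis₀ ++ [s], (∀ d, pvAdj g c d → d ∈ vis₀ ++ [s]) ∨ c ∈ [s] := by
    intro c hc
    rcases List.mem_append.mp hc with h | h
    · exact Or.inl (fun d hadj => List.mem_append_left _ (hcl c h d hadj))
    · exact Or.inr h
  have hb1 : 1 + pvUn g (vis₀ ++ [s]) ≤ g.length * (pvRow0 g).length + 1 := by
    have := pvUn_le g (vis₀ ++ [s])
    omega
  obtain ⟨C1, C2, C3, C4⟩ := pvFloodLoop_spec g (g.length * (pvRow0 g).length + 1)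
    (vis₀ ++ [s]) [s] hnd1 hq1 hcl1 hb1
  rw [hadd, hfuel]
  refine ⟨C1, ?_⟩
  intro c
  constructor
  · intro hc
    rcases C3 c hc with h | ⟨_, b, hbm, hr⟩
    · rcases List.mem_append.mp h with h2 | h2
      · exact Or.inl h2
      · exact Or.inr (List.mem_singleton.mp h2 ▸ Relation.ReflTransGen.refl)
    · exact Or.inr (List.mem_singleton.mp hbm ▸ hr)
  · intro h
    rcases h with h | hr
    · exact C2 c (List.mem_append_left _ h)
    · exact pvClosed_reach C4 (C2 _ (List.mem_append_right _ (by simp))) hr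

-- flattening the nested row/column folds into one fold over the cell list
lemma pvFoldFlat {σ : Type} (outer inner : List Int) (F : σ → Int → Int → σ) (init : σ) :
    outer.foldl (fun s i => inner.foldl (fun s j => F s i j) s) init
      = (outer.flatMap (fun i => inner.map (fun j => (i, j)))).foldl
          (fun s p => F s p.1 p.2) init := by
  induction outer generalizing init with
  | nil => rfl
  | cons a t ih => simp [List.foldl_append, List.foldl_map, ih]

-- invariant for a union of whole components
lemma pvInv_closed {g : List (List Int)} {P : List (Int × Int)} {vis : List (Int × Int)}
    (hInv : ∀ c, c ∈ vis ↔ ∃ p ∈ P, pvStart g p ∧ pvReach g p c) :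
    ∀ a ∈ vis, ∀ d, pvAdj g a d → d ∈ vis := by
  intro a ha d hadj
  obtain ⟨p, hp, hst, hr⟩ := (hInv a).mp ha
  exact (hInv d).mpr ⟨p, hp, hst, hr.tail hadj⟩

lemma pvInvB_closed {g : List (List Int)} {P : List (Int × Int)} {vis : List (Int × Int)}
    (hInv : ∀ c, c ∈ vis ↔ ∃ p ∈ P, pvCity g p ∧ pvReach g p c) :
    ∀ a ∈ vis, ∀ d, pvAdj g a d → d ∈ vis := by
  intro a ha d hadj
  obtain ⟨p, hp, hst, hr⟩ := (hInv a).mp ha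
  exact (hInv d).mpr ⟨p, hp, hst, hr.tail hadj⟩

lemma pvInvA_absorb {g : List (List Int)} {P vis : List (Int × Int)} {p : Int × Int}
    (hInv : ∀ c, c ∈ vis ↔ ∃ q ∈ P, pvStart g q ∧ pvReach g q c)
    (habs : pvStart g p → p ∈ vis) :
    ∀ c, c ∈ vis ↔ ∃ q ∈ P ++ [p], pvStart g q ∧ pvReach g q c := by
  intro c
  constructor
  · intro hc
    obtain ⟨q, hq, h⟩ := (hInv c).mp hc
    exact ⟨q, List.mem_append_left _ hq, h⟩
  · rintro ⟨q, hq, hst, hr⟩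
    rcases List.mem_append.mp hq with h | h
    · exact (hInv c).mpr ⟨q, h, hst, hr⟩
    · rw [List.mem_singleton] at h
      subst h
      exact pvClosed_reach (pvInv_closed hInv) (habs hst) hr

lemma pvInvA_fresh {g : List (List Int)} {P vis r1 : List (Int × Int)} {p : Int × Int}
    (hInv : ∀ c, c ∈ vis ↔ ∃ q ∈ P, pvStart g q ∧ pvReach g q c)
    (hst : pvStart g p)
    (hB2 : ∀ c, c ∈ r1 ↔ c ∈ vis ∨ pvReach g p c) :
    ∀ c, c ∈ r1 ↔ ∃ q ∈ P ++ [p], pvStart g q ∧ pvReach g q c := by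
  intro c
  rw [hB2 c]
  constructor
  · rintro (hc | hr)
    · obtain ⟨q, hq, h⟩ := (hInv c).mp hc
      exact ⟨q, List.mem_append_left _ hq, h⟩
    · exact ⟨p, List.mem_append_right _ (by simp), hst, hr⟩
  · rintro ⟨q, hq, hst', hr⟩
    rcases List.mem_append.mp hq with h | h
    · exact Or.inl ((hInv c).mpr ⟨q, h, hst', hr⟩)
    · rw [List.mem_singleton] at h
      subst h
      exact Or.inr hr

lemma pvInvB_absorb {g : List (List Int)} {P vis : List (Int × Int)} {p : Int × Int}
    (hInv : ∀ c, c ∈ vis ↔ ∃ q ∈ P, pvCity g q ∧ pvReach g q c)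
    (habs : pvCity g p → p ∈ vis) :
    ∀ c, c ∈ vis ↔ ∃ q ∈ P ++ [p], pvCity g q ∧ pvReach g q c := by
  intro c
  constructor
  · intro hc
    obtain ⟨q, hq, h⟩ := (hInv c).mp hc
    exact ⟨q, List.mem_append_left _ hq, h⟩
  · rintro ⟨q, hq, hst, hr⟩
    rcases List.mem_append.mp hq with h | h
    · exact (hInv c).mpr ⟨q, h, hst, hr⟩
    · rw [List.mem_singleton] at h
      subst h
      exact pvClosed_reach (pvInvB_closed hInv) (habs hst) hr

lemma pvInvB_fresh {g : List (List Int)} {P vis r1 : List (Int × Int)} {p : Int × Int}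
    (hInv : ∀ c, c ∈ vis ↔ ∃ q ∈ P, pvCity g q ∧ pvReach g q c)
    (hst : pvCity g p)
    (hB2 : ∀ c, c ∈ r1 ↔ c ∈ vis ∨ pvReach g p c) :
    ∀ c, c ∈ r1 ↔ ∃ q ∈ P ++ [p], pvCity g q ∧ pvReach g q c := by
  intro c
  rw [hB2 c]
  constructor
  · rintro (hc | hr)
    · obtain ⟨q, hq, h⟩ := (hInv c).mp hc
      exact ⟨q, List.mem_append_left _ hq, h⟩
    · exact ⟨p, List.mem_append_right _ (by simp), hst, hr⟩
  · rintro ⟨q, hq, hst', hr⟩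
    rcases List.mem_append.mp hq with h | h
    · exact Or.inl ((hInv c).mpr ⟨q, h, hst', hr⟩)
    · rw [List.mem_singleton] at h
      subst h
      exact Or.inr hr

-- the main scan of A counts pvSelA
lemma pvMainA (g : List (List Int)) :
    ∀ (R P : List (Int × Int)) (cnt : Int) (vis : PySem.Set (Int × Int)),
    pvL g = P ++ R →
    vis.Nodup →
    (∀ c, c ∈ vis ↔ ∃ p ∈ P, pvStart g p ∧ pvReach g p c) →
    (R.foldl (fun (s : Int × PySem.Set (Int × Int)) p =>
        if pvCell g p.1 p.2 = 1 ∨ (pvCell g p.1 p.2 = 2 ∧ ¬ (p.1, p.2) ∈ s.2) then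
          let r := pvBfs g p.1 p.2 s.2
          (if r.2 then s.1 + 1 else s.1, r.1)
        else s) (cnt, vis)).1 = cnt + ((pvSelA g P R).length : Int) := by
  intro R
  induction R with
  | nil =>
    intro P cnt vis hL hnd hInv
    simp [pvSelA]
  | cons p R' ih =>
    intro P cnt vis hL hnd hInv
    simp only [List.foldl_cons, Prod.mk.eta]
    have hpL : p ∈ pvL g := hL ▸ List.mem_append_right _ (List.mem_cons_self ..)
    have hpb := (pvMem_pvL g p).mp hpL
    have hL' : pvL g = (P ++ [p]) ++ R' := by rw [hL]; simp
    have hclosed := pvInv_closed hInv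
    simp only [pvSelA]
    by_cases hv1 : pvVal g p = 1
    · have hgood : pvGood g p := ⟨hpb.1, hpb.2.1, hpb.2.2.1, hpb.2.2.2, by rw [hv1]; omega⟩
      have hcond : pvCell g p.1 p.2 = 1 ∨ (pvCell g p.1 p.2 = 2 ∧ ¬ p ∈ vis) := Or.inl hv1
      rw [if_pos hcond]
      by_cases hvis : p ∈ vis
      · have hbfs := pvBfs_visited g p vis hclosed hgood hvis hv1
        have hinc : ¬ pvIncA g P p := fun hin => hin.2.2 ((hInv p).mp hvis)
        rw [if_neg hinc]
        simp only [hbfs, Bool.false_eq_true, if_false]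
        exact ih (P ++ [p]) cnt vis hL' hnd (pvInvA_absorb hInv (fun _ => hvis))
      · obtain ⟨B1, B2, B3⟩ := pvBfs_spec g p vis hnd hclosed hgood hvis (Or.inl hv1)
        have hInv' := pvInvA_fresh hInv ⟨hgood, Or.inl hv1⟩ B2
        by_cases hc : pvHasCity g p
        · have hr2 : (pvBfs g p.1 p.2 vis).2 = true := B3.mpr hc
          have hinc : pvIncA g P p := ⟨⟨hgood, Or.inl hv1⟩, hc,
            fun hex => hvis ((hInv p).mpr hex)⟩
          rw [if_pos hinc]
          simp only [hr2, if_true]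
          rw [ih (P ++ [p]) (cnt + 1) _ hL' B1 hInv']
          simp only [List.length_cons]
          push_cast
          ring
        · have hr2 : (pvBfs g p.1 p.2 vis).2 = false := by
            rw [← Bool.not_eq_true]
            exact fun h => hc (B3.mp h)
          have hinc : ¬ pvIncA g P p := fun hin => hc hin.2.1
          rw [if_neg hinc]
          simp only [hr2, Bool.false_eq_true, if_false]
          exact ih (P ++ [p]) cnt _ hL' B1 hInv'
    · by_cases hv2 : pvVal g p = 2
      · by_cases hvis : p ∈ vis
        · have hcond : ¬ (pvCell g p.1 p.2 = 1 ∨ (pvCell g p.1 p.2 = 2 ∧ ¬ p ∈ vis)) := by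
            rintro (h | ⟨_, h⟩)
            · exact hv1 h
            · exact h hvis
          rw [if_neg hcond]
          have hinc : ¬ pvIncA g P p := fun hin => hin.2.2 ((hInv p).mp hvis)
          rw [if_neg hinc]
          exact ih (P ++ [p]) cnt vis hL' hnd (pvInvA_absorb hInv (fun _ => hvis))
        · have hgood : pvGood g p := ⟨hpb.1, hpb.2.1, hpb.2.2.1, hpb.2.2.2, by rw [hv2]; omega⟩
          have hcond : pvCell g p.1 p.2 = 1 ∨ (pvCell g p.1 p.2 = 2 ∧ ¬ p ∈ vis) :=
            Or.inr ⟨hv2, hvis⟩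
          rw [if_pos hcond]
          obtain ⟨B1, B2, B3⟩ := pvBfs_spec g p vis hnd hclosed hgood hvis (Or.inr hv2)
          have hInv' := pvInvA_fresh hInv ⟨hgood, Or.inr hv2⟩ B2
          have hc : pvHasCity g p := ⟨p, Relation.ReflTransGen.refl, hv2⟩
          have hr2 : (pvBfs g p.1 p.2 vis).2 = true := B3.mpr hc
          have hinc : pvIncA g P p := ⟨⟨hgood, Or.inr hv2⟩, hc,
            fun hex => hvis ((hInv p).mpr hex)⟩
          rw [if_pos hinc]
          simp only [hr2, if_true]
          rw [ih (P ++ [p]) (cnt + 1) _ hL' B1 hInv']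
          simp only [List.length_cons]
          push_cast
          ring
      · have hcond : ¬ (pvCell g p.1 p.2 = 1 ∨ (pvCell g p.1 p.2 = 2 ∧ ¬ p ∈ vis)) := by
          rintro (h | ⟨h, _⟩)
          · exact hv1 h
          · exact hv2 h
        rw [if_neg hcond]
        have hinc : ¬ pvIncA g P p := fun hin => by
          rcases hin.1.2 with h | h
          · exact hv1 h
          · exact hv2 h
        rw [if_neg hinc]
        refine ih (P ++ [p]) cnt vis hL' hnd (pvInvA_absorb hInv (fun hst => ?_))
        rcases hst.2 with h | h
        · exact absurd h hv1
        · exact absurd h hv2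

-- the main scan of B counts pvSelB
lemma pvMainB (g : List (List Int)) :
    ∀ (R P : List (Int × Int)) (cnt : Int) (vis : PySem.Set (Int × Int)),
    pvL g = P ++ R →
    vis.Nodup →
    (∀ c, c ∈ vis ↔ ∃ p ∈ P, pvCity g p ∧ pvReach g p c) →
    (R.foldl (fun (s : Int × PySem.Set (Int × Int)) p =>
        if pvCell g p.1 p.2 = 2 ∧ ¬ (p.1, p.2) ∈ s.2 then
          (s.1 + 1,
            pvFloodLoop g (g.length : Int) ((pvRow0 g).length : Int)
              ((g.length : Int).toNat * (((pvRow0 g).length : Int)).toNat + 1)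
              (PySem.Set.add s.2 (p.1, p.2)) [(p.1, p.2)])
        else s) (cnt, vis)).1 = cnt + ((pvSelB g P R).length : Int) := by
  intro R
  induction R with
  | nil =>
    intro P cnt vis hL hnd hInv
    simp [pvSelB]
  | cons p R' ih =>
    intro P cnt vis hL hnd hInv
    simp only [List.foldl_cons, Prod.mk.eta]
    have hpL : p ∈ pvL g := hL ▸ List.mem_append_right _ (List.mem_cons_self ..)
    have hpb := (pvMem_pvL g p).mp hpL
    have hL' : pvL g = (P ++ [p]) ++ R' := by rw [hL]; simp
    have hclosed := pvInvB_closed hInv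
    simp only [pvSelB]
    by_cases hv2 : pvVal g p = 2
    · by_cases hvis : p ∈ vis
      · have hcond : ¬ (pvCell g p.1 p.2 = 2 ∧ ¬ p ∈ vis) := fun ⟨_, h⟩ => h hvis
        rw [if_neg hcond]
        have hinc : ¬ pvIncB g P p := fun hin => hin.2 ((hInv p).mp hvis)
        rw [if_neg hinc]
        exact ih (P ++ [p]) cnt vis hL' hnd (pvInvB_absorb hInv (fun _ => hvis))
      · have hgood : pvGood g p := ⟨hpb.1, hpb.2.1, hpb.2.2.1, hpb.2.2.2, by rw [hv2]; omega⟩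
        have hcond : pvCell g p.1 p.2 = 2 ∧ ¬ p ∈ vis := ⟨hv2, hvis⟩
        rw [if_pos hcond]
        obtain ⟨C1, C2⟩ := pvFlood_spec g p vis hnd hclosed hgood hvis
        have hInv' := pvInvB_fresh hInv ⟨hgood, hv2⟩ C2
        have hinc : pvIncB g P p := ⟨⟨hgood, hv2⟩, fun hex => hvis ((hInv p).mpr hex)⟩
        rw [if_pos hinc]
        rw [ih (P ++ [p]) (cnt + 1) _ hL' C1 hInv']
        simp only [List.length_cons]
        push_cast
        ring
    · have hcond : ¬ (pvCell g p.1 p.2 = 2 ∧ ¬ p ∈ vis) := fun ⟨h, _⟩ => hv2 h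
      rw [if_neg hcond]
      have hinc : ¬ pvIncB g P p := fun hin => hv2 hin.1.2
      rw [if_neg hinc]
      exact ih (P ++ [p]) cnt vis hL' hnd
        (pvInvB_absorb hInv (fun hst => absurd hst.2 hv2))

lemma pvA_eq (g : List (List Int)) :
    numIslandCities g = ((pvSelA g [] (pvL g)).length : Int) := by
  unfold numIslandCities
  by_cases hemp : g = [] ∨ pvRow0 g = []
  · rw [if_pos hemp]
    have hnil : pvL g = [] := by
      refine List.eq_nil_iff_forall_not_mem.mpr (fun c hc => ?_)
      obtain ⟨h1, h2, h3, h4⟩ := (pvMem_pvL g c).mp hc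
      rcases hemp with h | h
      · rw [h] at h2; simp at h2; omega
      · rw [h] at h4; simp at h4; omega
    rw [hnil]
    simp [pvSelA]
  · rw [if_neg hemp]
    rw [pvFoldFlat]
    have hmain := pvMainA g (pvL g) [] 0 PySem.Set.empty rfl List.nodup_nil
      (fun c => by simp [PySem.Set.empty])
    rw [zero_add] at hmain
    exact hmain

lemma pvB_eq (g : List (List Int)) :
    numIslandCities_alt g = ((pvSelB g [] (pvL g)).length : Int) := by
  unfold numIslandCities_alt
  by_cases hemp : g = [] ∨ pvRow0 g = []
  · rw [if_pos hemp]
    have hnil : pvL g = [] := by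
      refine List.eq_nil_iff_forall_not_mem.mpr (fun c hc => ?_)
      obtain ⟨h1, h2, h3, h4⟩ := (pvMem_pvL g c).mp hc
      rcases hemp with h | h
      · rw [h] at h2; simp at h2; omega
      · rw [h] at h4; simp at h4; omega
    rw [hnil]
    simp [pvSelB]
  · rw [if_neg hemp]
    simp only []
    rw [pvFoldFlat]
    have hmain := pvMainB g (pvL g) [] 0 PySem.Set.empty rfl List.nodup_nil
      (fun c => by simp [PySem.Set.empty])
    rw [zero_add] at hmain
    exact hmain

-- prefix membership in a Nodup list vs positions
lemma pvMemPrefix {l P₁ R : List (Int × Int)} {p q : Int × Int}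
    (hl : l = P₁ ++ p :: R) (hnd : l.Nodup) (hq : q ∈ l) :
    q ∈ P₁ ↔ l.idxOf q < l.idxOf p := by
  subst hl
  have hpn : p ∉ P₁ := fun hmem =>
    (List.Pairwise.rel_of_mem_append hnd hmem (List.mem_cons_self ..)) rfl
  have hip : (P₁ ++ p :: R).idxOf p = P₁.length := by
    rw [List.idxOf_append_of_notMem hpn]; simp
  constructor
  · intro hqP
    rw [hip, List.idxOf_append_of_mem hqP]
    exact List.idxOf_lt_length_of_mem hqP
  · intro hlt
    by_contra hqP
    rw [hip, List.idxOf_append_of_notMem hqP] at hlt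
    omega

lemma pvIncA_iff_QA {g : List (List Int)} {P R : List (Int × Int)} {p : Int × Int}
    (hL : pvL g = P ++ p :: R) : pvIncA g P p ↔ pvQA g p := by
  have hnd := pvNodup_pvL g
  have hpL : p ∈ pvL g := hL ▸ List.mem_append_right _ (List.mem_cons_self ..)
  unfold pvIncA pvQA
  refine and_congr_right fun _ => and_congr_right fun _ => ?_
  constructor
  · intro h q hst hr hbef
    exact h ⟨q, (pvMemPrefix hL hnd hbef.1).mpr hbef.2.2, hst, hr⟩
  · rintro h ⟨q, hqP, hst, hr⟩
    have hqL : q ∈ pvL g := pvGood_mem_pvL hst.1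
    exact h q hst hr ⟨hqL, hpL, (pvMemPrefix hL hnd hqL).mp hqP⟩

lemma pvIncB_iff_QB {g : List (List Int)} {P R : List (Int × Int)} {p : Int × Int}
    (hL : pvL g = P ++ p :: R) : pvIncB g P p ↔ pvQB g p := by
  have hnd := pvNodup_pvL g
  have hpL : p ∈ pvL g := hL ▸ List.mem_append_right _ (List.mem_cons_self ..)
  unfold pvIncB pvQB
  refine and_congr_right fun _ => ?_
  constructor
  · intro h q hst hr hbef
    exact h ⟨q, (pvMemPrefix hL hnd hbef.1).mpr hbef.2.2, hst, hr⟩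
  · rintro h ⟨q, hqP, hst, hr⟩
    have hqL : q ∈ pvL g := pvGood_mem_pvL hst.1
    exact h q hst hr ⟨hqL, hpL, (pvMemPrefix hL hnd hqL).mp hqP⟩

lemma pvMemSelA (g : List (List Int)) :
    ∀ (R P : List (Int × Int)), pvL g = P ++ R →
    ∀ p, (p ∈ pvSelA g P R ↔ p ∈ R ∧ pvQA g p) := by
  intro R
  induction R with
  | nil => intro P hL p; simp [pvSelA]
  | cons p0 R' ih =>
    intro P hL p
    have hL' : pvL g = (P ++ [p0]) ++ R' := by rw [hL]; simp
    have hnd := pvNodup_pvL g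
    have hiff := pvIncA_iff_QA (g := g) (P := P) (p := p0) (R := R') hL
    simp only [pvSelA]
    by_cases hinc : pvIncA g P p0
    · rw [if_pos hinc]
      simp only [List.mem_cons]
      constructor
      · rintro (rfl | hmem)
        · exact ⟨Or.inl rfl, hiff.mp hinc⟩
        · obtain ⟨h1, h2⟩ := (ih (P ++ [p0]) hL' p).mp hmem
          exact ⟨Or.inr h1, h2⟩
      · rintro ⟨(rfl | hmem), hq⟩
        · exact Or.inl rfl
        · exact Or.inr ((ih _ hL' p).mpr ⟨hmem, hq⟩)
    · rw [if_neg hinc]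
      rw [ih (P ++ [p0]) hL' p]
      simp only [List.mem_cons]
      constructor
      · rintro ⟨h1, h2⟩
        exact ⟨Or.inr h1, h2⟩
      · rintro ⟨(rfl | hmem), hq⟩
        · exact absurd (hiff.mpr hq) hinc
        · exact ⟨hmem, hq⟩

lemma pvMemSelB (g : List (List Int)) :
    ∀ (R P : List (Int × Int)), pvL g = P ++ R →
    ∀ p, (p ∈ pvSelB g P R ↔ p ∈ R ∧ pvQB g p) := by
  intro R
  induction R with
  | nil => intro P hL p; simp [pvSelB]
  | cons p0 R' ih =>
    intro P hL p
    have hL' : pvL g = (P ++ [p0]) ++ R' := by rw [hL]; simp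
    have hnd := pvNodup_pvL g
    have hiff := pvIncB_iff_QB (g := g) (P := P) (p := p0) (R := R') hL
    simp only [pvSelB]
    by_cases hinc : pvIncB g P p0
    · rw [if_pos hinc]
      simp only [List.mem_cons]
      constructor
      · rintro (rfl | hmem)
        · exact ⟨Or.inl rfl, hiff.mp hinc⟩
        · obtain ⟨h1, h2⟩ := (ih (P ++ [p0]) hL' p).mp hmem
          exact ⟨Or.inr h1, h2⟩
      · rintro ⟨(rfl | hmem), hq⟩
        · exact Or.inl rfl
        · exact Or.inr ((ih _ hL' p).mpr ⟨hmem, hq⟩)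
    · rw [if_neg hinc]
      rw [ih (P ++ [p0]) hL' p]
      simp only [List.mem_cons]
      constructor
      · rintro ⟨h1, h2⟩
        exact ⟨Or.inr h1, h2⟩
      · rintro ⟨(rfl | hmem), hq⟩
        · exact absurd (hiff.mpr hq) hinc
        · exact ⟨hmem, hq⟩

lemma pvSelA_sublist (g : List (List Int)) :
    ∀ (R P : List (Int × Int)), List.Sublist (pvSelA g P R) R := by
  intro R
  induction R with
  | nil => intro P; simp [pvSelA]
  | cons p R' ih =>
    intro P
    simp only [pvSelA]
    by_cases hinc : pvIncA g P p
    · rw [if_pos hinc]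
      exact (ih (P ++ [p])).cons₂ p
    · rw [if_neg hinc]
      exact (ih (P ++ [p])).cons p

lemma pvSelB_sublist (g : List (List Int)) :
    ∀ (R P : List (Int × Int)), List.Sublist (pvSelB g P R) R := by
  intro R
  induction R with
  | nil => intro P; simp [pvSelB]
  | cons p R' ih =>
    intro P
    simp only [pvSelB]
    by_cases hinc : pvIncB g P p
    · rw [if_pos hinc]
      exact (ih (P ++ [p])).cons₂ p
    · rw [if_neg hinc]
      exact (ih (P ++ [p])).cons p

-- first element of a Nodup list satisfying a predicate
lemma pvFirst_spec {Pr : (Int × Int) → Prop} {g : List (List Int)} {w : Int × Int}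
    (hw : w ∈ pvL g) (hPw : Pr w) :
    ∃ a, (pvL g).find? (fun q => @decide (Pr q) (Classical.propDecidable _)) = some a ∧
      a ∈ pvL g ∧ Pr a ∧ ∀ b, b ∈ pvL g → Pr b → ¬ pvBefore g b a := by
  have hsome : ((pvL g).find? (fun q => @decide (Pr q) (Classical.propDecidable _))).isSome := by
    rw [List.find?_isSome]
    exact ⟨w, hw, @decide_eq_true _ (Classical.propDecidable _) hPw⟩
  obtain ⟨a, ha⟩ := Option.isSome_iff_exists.mp hsome
  obtain ⟨hpa, l1, l2, hl, hprev⟩ := List.find?_eq_some_iff_append.mp ha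
  refine ⟨a, ha, ?_, @of_decide_eq_true _ (Classical.propDecidable _) hpa, ?_⟩
  · rw [hl]
    exact List.mem_append_right _ (List.mem_cons_self ..)
  · intro b hb hPb hbef
    have hbP : b ∈ l1 := (pvMemPrefix hl (pvNodup_pvL g) hb).mpr hbef.2.2
    have hfalse := hprev b hbP
    rw [@decide_eq_true _ (Classical.propDecidable _) hPb] at hfalse
    simp at hfalse

lemma pvFirstCity_spec {g : List (List Int)} {p : Int × Int}
    (hp : pvGood g p) (hc : pvHasCity g p) :
    pvCity g (pvFirstCity g p) ∧ pvReach g (pvFirstCity g p) p ∧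
      ∀ b, pvCity g b → pvReach g b p → ¬ pvBefore g b (pvFirstCity g p) := by
  obtain ⟨d, hr, h2⟩ := hc
  have hgd : pvGood g d := pvReach_good hr hp
  obtain ⟨a, ha, haL, haP, hamin⟩ :=
    pvFirst_spec (Pr := fun q => pvCity g q ∧ pvReach g q p) (pvGood_mem_pvL hgd)
      ⟨⟨hgd, h2⟩, pvReach_symm hr⟩
  have he : pvFirstCity g p = a := by
    unfold pvFirstCity
    rw [ha]
    rfl
  rw [he]
  exact ⟨haP.1, haP.2, fun b hb hrb => hamin b (pvGood_mem_pvL hb.1) ⟨hb, hrb⟩⟩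

lemma pvFirstStart_spec {g : List (List Int)} {p : Int × Int}
    (hp : pvGood g p) (hst : pvStart g p) :
    pvStart g (pvFirstStart g p) ∧ pvReach g (pvFirstStart g p) p ∧
      ∀ b, pvStart g b → pvReach g b p → ¬ pvBefore g b (pvFirstStart g p) := by
  obtain ⟨a, ha, haL, haP, hamin⟩ :=
    pvFirst_spec (Pr := fun q => pvStart g q ∧ pvReach g q p) (pvGood_mem_pvL hp)
      ⟨hst, Relation.ReflTransGen.refl⟩
  have he : pvFirstStart g p = a := by
    unfold pvFirstStart
    rw [ha]
    rfl
  rw [he]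
  exact ⟨haP.1, haP.2, fun b hb hrb => hamin b (pvGood_mem_pvL hb.1) ⟨hb, hrb⟩⟩

-- distinct members of pvL are ordered one way or the other
lemma pvBefore_total {g : List (List Int)} {p q : Int × Int}
    (hp : p ∈ pvL g) (hq : q ∈ pvL g) (hne : p ≠ q) : pvBefore g p q ∨ pvBefore g q p := by
  have : (pvL g).idxOf p ≠ (pvL g).idxOf q := fun h => hne ((List.idxOf_inj hp).mp h)
  rcases Nat.lt_or_gt_of_ne this with h | h
  · exact Or.inl ⟨hp, hq, h⟩
  · exact Or.inr ⟨hq, hp, h⟩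

lemma pvLenBij (u v : List (Int × Int)) (f : (Int × Int) → (Int × Int))
    (hu : u.Nodup) (hv : v.Nodup)
    (h1 : ∀ p ∈ u, f p ∈ v)
    (h2 : ∀ p ∈ u, ∀ p' ∈ u, f p = f p' → p = p')
    (h3 : ∀ q ∈ v, ∃ p ∈ u, f p = q) :
    u.length = v.length := by
  have hmap : (u.map f).Nodup := List.Nodup.map_on h2 hu
  have hperm : (u.map f).Perm v := by
    rw [List.perm_ext_iff_of_nodup hmap hv]
    intro x
    constructor
    · intro hx
      obtain ⟨p, hp, rfl⟩ := List.mem_map.mp hx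
      exact h1 p hp
    · intro hx
      obtain ⟨p, hp, hfp⟩ := h3 x hx
      exact List.mem_map.mpr ⟨p, hp, hfp⟩
  calc u.length = (u.map f).length := (List.length_map ..).symm
    _ = v.length := hperm.length_eq

lemma pvCount_eq (g : List (List Int)) :
    (pvSelA g [] (pvL g)).length = (pvSelB g [] (pvL g)).length := by
  have hnd := pvNodup_pvL g
  have hselAnd : (pvSelA g [] (pvL g)).Nodup := (pvSelA_sublist g (pvL g) []).nodup hnd
  have hselBnd : (pvSelB g [] (pvL g)).Nodup := (pvSelB_sublist g (pvL g) []).nodup hnd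
  have hmemA := pvMemSelA g (pvL g) [] rfl
  have hmemB := pvMemSelB g (pvL g) [] rfl
  apply pvLenBij _ _ (pvFirstCity g) hselAnd hselBnd
  · intro p hp
    obtain ⟨hpL, hst, hhc, hmin⟩ := (hmemA p).mp hp
    obtain ⟨hcity, hreach, hfmin⟩ := pvFirstCity_spec hst.1 hhc
    refine (hmemB _).mpr ⟨pvGood_mem_pvL hcity.1, hcity, ?_⟩
    intro q hq hrq hbef
    exact hfmin q hq (hrq.trans hreach) hbef
  · intro p hp p' hp' hfe
    obtain ⟨hpL, hst, hhc, hmin⟩ := (hmemA p).mp hp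
    obtain ⟨hpL', hst', hhc', hmin'⟩ := (hmemA p').mp hp'
    obtain ⟨hc1, hr1, _⟩ := pvFirstCity_spec hst.1 hhc
    obtain ⟨hc1', hr1', _⟩ := pvFirstCity_spec hst'.1 hhc'
    rw [hfe] at hr1
    have hr_pp' : pvReach g p' p := (pvReach_symm hr1').trans hr1
    by_contra hne
    rcases pvBefore_total hpL hpL' hne with hb | hb
    · exact hmin' p hst (pvReach_symm hr_pp') hb
    · exact hmin p' hst' hr_pp' hb
  · intro q hq
    obtain ⟨hqL, hcity, hminB⟩ := (hmemB q).mp hq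
    have hstq : pvStart g q := ⟨hcity.1, Or.inr hcity.2⟩
    obtain ⟨hstp, hreach, hfmin⟩ := pvFirstStart_spec hcity.1 hstq
    refine ⟨pvFirstStart g q, ?_, ?_⟩
    · refine (hmemA _).mpr ⟨pvGood_mem_pvL hstp.1, hstp,
        ⟨q, hreach, hcity.2⟩, ?_⟩
      intro r hr hrr hbef
      exact hfmin r hr (hrr.trans hreach) hbef
    · have hhcp : pvHasCity g (pvFirstStart g q) := ⟨q, hreach, hcity.2⟩
      obtain ⟨hc0, hr0, hmin0⟩ := pvFirstCity_spec hstp.1 hhcp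
      have hrq0 : pvReach g (pvFirstCity g (pvFirstStart g q)) q := hr0.trans hreach
      by_contra hne
      rcases pvBefore_total (pvGood_mem_pvL hc0.1) hqL hne with hb | hb
      · exact hminB _ hc0 hrq0 hb
      · exact hmin0 q hcity (pvReach_symm hreach) hb

-- ===== VERDICT (by name: the statement is the Claim_ definition above) =====
theorem numIslandCities_spec : Claim_equal_numIslandCities := by
  intro grid _ _
  unfold Spec_numIslandCities
  rw [pvA_eq, pvB_eq, pvCount_eq]
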